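-- pv_equiv track=rewrite | github.com/JRA2002/python_problems | arrays/geeksforgeeks/order_positive_negative.py | rearrange_1
-- ===== SOURCE A (Python) =====
-- def rearrange_1(n, arr):
--     for i in range(n):
--             key = arr[i]
--             if key > 0:
--                   continue
--             j = i - 1
--             while j >= 0 and arr[j] >= 0:
--
--                 arr[j+1] = arr[j]
--                 j -= 1
--             arr[j+1] = key
--     return arr
-- ===== SOURCE B (Python) =====
-- def rearrange_1(n, arr):
--     m = max(n, 0)
--     head = arr[:m]
--     neg = [x for x in head if x < 0]
--     zero = [x for x in head if x == 0]
--     pos = [x for x in head if x > 0]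
--     arr[:m] = neg + zero + pos
--     return arr
-- ===== Notes on version B (the rewrite author's own statement) =====
-- stated objective: simpler
-- what changed: Replaces A's insertion-sort-style backward shifting with a direct stable three-way partition of the first n elements (negatives, zeros, positives by filtering) written back in place.
import Mathlib
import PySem

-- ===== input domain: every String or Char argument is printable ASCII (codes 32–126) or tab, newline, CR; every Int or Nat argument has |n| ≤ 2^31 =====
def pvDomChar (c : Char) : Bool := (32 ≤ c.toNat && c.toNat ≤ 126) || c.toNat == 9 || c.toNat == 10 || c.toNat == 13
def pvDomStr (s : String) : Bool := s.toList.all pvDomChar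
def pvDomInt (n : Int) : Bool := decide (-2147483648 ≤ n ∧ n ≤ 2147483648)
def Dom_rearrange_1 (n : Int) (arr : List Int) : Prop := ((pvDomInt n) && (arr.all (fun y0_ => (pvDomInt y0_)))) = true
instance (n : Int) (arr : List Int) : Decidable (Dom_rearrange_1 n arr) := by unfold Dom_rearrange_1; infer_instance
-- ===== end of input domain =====

-- B computes the stable three-way partition (negatives, zeros, positives) of the first n elements
-- directly by filtering, replacing A's insertion-sort-style shifting; A mutates arr in place, the
-- equivalence proved is about the return value.

-- ===== PORT A =====
-- the inner 'while j >= 0 and arr[j] >= 0: arr[j+1] = arr[j]; j -= 1' loop;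
-- fuel only makes the recursion total: the caller passes enough for every Python iteration
def rearrangeWhileA (fuel : Nat) (arr : List Int) (j : Int) : List Int × Int :=
  match fuel with
  | 0 => (arr, j)
  | fuel + 1 =>
    if j ≥ 0 ∧ PySem.List.pyGetD arr j 0 ≥ 0 then
      rearrangeWhileA fuel (PySem.List.pySetD arr (j + 1) (PySem.List.pyGetD arr j 0)) (j - 1)
    else (arr, j)

-- the body of A's 'for i in range(n)' loop, acting on the current list a
def stepA (a : List Int) (i : Int) : List Int :=
  let key := PySem.List.pyGetD a i 0
  if key > 0 then a
  else
    let r := rearrangeWhileA i.toNat a (i - 1)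
    PySem.List.pySetD r.1 (r.2 + 1) key

def rearrange_1 (n : Int) (arr : List Int) : List Int :=
  (PySem.List.pyRange 0 n 1).foldl stepA arr

-- ===== PORT B =====
def rearrange_1_alt (n : Int) (arr : List Int) : List Int :=
  let m := max n 0
  let head := PySem.List.slice arr (some 0) (some m)
  let neg := head.filter (fun x => x < 0)
  let zero := head.filter (fun x => x = 0)
  let pos := head.filter (fun x => x > 0)
  neg ++ zero ++ pos ++ arr.drop m.toNat

-- ===== PRECONDITION & SPEC =====
-- A raises IndexError as soon as it reads arr[i] with i >= len(arr); Pre_ admits exactly n <= len(arr).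
def Pre_rearrange_1 (n : Int) (arr : List Int) : Prop := n ≤ PySem.List.len arr
instance (n : Int) (arr : List Int) : Decidable (Pre_rearrange_1 n arr) := by unfold Pre_rearrange_1; infer_instance
def pvWitness_rearrange_1 : Int × List Int := (4, [3, 0, -1, 2])

def Spec_rearrange_1 (n : Int) (arr : List Int) (out : List Int) : Prop := out = rearrange_1_alt n arr
instance (n : Int) (arr : List Int) (out : List Int) : Decidable (Spec_rearrange_1 n arr out) := by unfold Spec_rearrange_1; infer_instance

-- ===== CLAIM (what is proved, stated in full; the proofs are below) =====
def Claim_equal_rearrange_1 : Prop := ∀ (n : Int) (arr : List Int), Dom_rearrange_1 n arr → Pre_rearrange_1 n arr → Spec_rearrange_1 n arr (rearrange_1 n arr)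

-- ===== LEMMAS AND PROOFS =====

-- the contents of the first non-negative block after the while loop has shifted it one slot right
def headDup (Q : List Int) (c : Int) : List Int :=
  match Q with
  | [] => [c]
  | q :: qs => q :: q :: qs

theorem pyGetD_append_length (L r : List Int) (x d : Int) :
    PySem.List.pyGetD (L ++ x :: r) (L.length : Int) d = x := by
  simp [PySem.List.pyGetD_natCast, List.getD, List.getElem?_append_right (Nat.le_refl _)]

theorem pySetD_append_length (L r : List Int) (x v : Int) :
    PySem.List.pySetD (L ++ x :: r) (L.length : Int) v = L ++ v :: r := by
  simp [PySem.List.pySetD_natCast, List.set_append_right _ _ (Nat.le_refl _)]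

theorem pyGetD_append_last (N r : List Int) (d : Int) (h : N ≠ []) :
    PySem.List.pyGetD (N ++ r) ((N.length : Int) - 1) d = N.getLast h := by
  induction N using List.reverseRecOn with
  | nil => exact absurd rfl h
  | append_singleton N' y _ =>
    have e : (N' ++ [y]) ++ r = N' ++ y :: r := by simp
    have hj : (((N' ++ [y]).length : Nat) : Int) - 1 = (N'.length : Int) := by simp
    rw [e, hj, pyGetD_append_length, List.getLast_append_singleton]

theorem shiftA (Q : List Int) : ∀ (N rest : List Int) (c : Int) (fuel : Nat),
    (∀ x ∈ Q, 0 ≤ x) → (∀ h : N ≠ [], N.getLast h < 0) → Q.length ≤ fuel →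
    rearrangeWhileA fuel (N ++ Q ++ c :: rest) ((N.length + Q.length : Nat) - 1)
      = (N ++ headDup Q c ++ rest, (N.length : Int) - 1) := by
  induction Q using List.reverseRecOn with
  | nil =>
    intro N rest c fuel _ hN _
    match fuel with
    | 0 => simp [rearrangeWhileA, headDup]
    | f + 1 =>
      match N with
      | [] => simp [rearrangeWhileA, headDup]
      | y :: N' =>
        rw [rearrangeWhileA]
        have e : (y :: N') ++ [] ++ c :: rest = (y :: N') ++ (c :: rest) := by simp
        have hj : (((y :: N').length + ([] : List Int).length : Nat) : Int) - 1
            = ((y :: N').length : Int) - 1 := by simp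
        rw [e, hj, pyGetD_append_last _ _ _ (by simp)]
        rw [if_neg (by push_neg; intro _; exact lt_of_lt_of_le (hN (by simp)) (by norm_num))]
        simp [headDup]
  | append_singleton qs q ih =>
    intro N rest c fuel hQ hN hf
    have hf' : qs.length + 1 ≤ fuel := by simpa using hf
    match fuel with
    | f + 1 =>
      rw [rearrangeWhileA]
      have e1 : N ++ (qs ++ [q]) ++ c :: rest = (N ++ qs) ++ q :: (c :: rest) := by simp
      have hj : ((N.length + (qs ++ [q]).length : Nat) : Int) - 1 = (((N ++ qs).length : Nat) : Int) := by
        simp; push_cast; ring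
      rw [e1, hj, pyGetD_append_length]
      have hq0 : (0:Int) ≤ q := hQ q (by simp)
      rw [if_pos ⟨by positivity, hq0⟩]
      have e3 : N ++ qs ++ q :: c :: rest = (N ++ qs ++ [q]) ++ c :: rest := by simp
      have hj3 : ((N ++ qs).length : Int) + 1 = (((N ++ qs ++ [q]).length : Nat) : Int) := by simp; ring
      rw [e3, hj3, pySetD_append_length]
      have e2 : (N ++ qs ++ [q]) ++ q :: rest = N ++ qs ++ q :: (q :: rest) := by simp
      have hj2 : ((((N ++ qs).length : Nat)) : Int) - 1 = ((N.length + qs.length : Nat) : Int) - 1 := by simp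
      rw [e2, hj2, ih N (q :: rest) q f (fun x hx => hQ x (by simp [hx])) hN (by omega)]
      congr 1
      match qs with
      | [] => simp [headDup]
      | a :: as => simp [headDup]

theorem zeros_swap (Z : List Int) (h : ∀ x ∈ Z, x = (0:Int)) : (0:Int) :: Z = Z ++ [0] := by
  induction Z with
  | nil => rfl
  | cons z zs ih =>
    have hz : z = 0 := h z (by simp)
    subst hz
    simpa using ih (fun x hx => h x (by simp [hx]))

theorem pySetD_headDup (N Q rest : List Int) (c v : Int) :
    PySem.List.pySetD (N ++ headDup Q c ++ rest) ((N.length : Int)) v = N ++ v :: (Q ++ rest) := by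
  match Q with
  | [] =>
    have e : N ++ headDup [] c ++ rest = N ++ c :: rest := by simp [headDup]
    rw [e, pySetD_append_length]; simp
  | q :: qs =>
    have e : N ++ headDup (q :: qs) c ++ rest = N ++ q :: (q :: qs ++ rest) := by simp [headDup]
    rw [e, pySetD_append_length]

theorem outerA (s : List Int) : ∀ (N Z P t : List Int),
    (∀ x ∈ N, x < 0) → (∀ x ∈ Z, x = (0:Int)) → (∀ x ∈ P, (0:Int) < x) →
    (PySem.List.pyRange ((N.length + Z.length + P.length : Nat) : Int)
        (((N.length + Z.length + P.length : Nat) : Int) + s.length) 1).foldl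
      stepA
      (N ++ Z ++ P ++ s ++ t)
    = (N ++ s.filter (fun x => decide (x < 0))) ++ (Z ++ s.filter (fun x => decide (x = 0)))
      ++ (P ++ s.filter (fun x => decide (0 < x))) ++ t := by
  induction s with
  | nil =>
    intro N Z P t hN hZ hP
    rw [show (((N.length + Z.length + P.length : Nat) : Int) + ([] : List Int).length)
        = ((N.length + Z.length + P.length : Nat) : Int) by simp,
      PySem.List.pyRange_one_eq_nil (le_refl _)]
    simp
  | cons x s' ih =>
    intro N Z P t hN hZ hP
    have hk : ((N.length + Z.length + P.length : Nat) : Int)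
        < ((N.length + Z.length + P.length : Nat) : Int) + (x :: s').length := by
      simp
    rw [PySem.List.pyRange_one_cons hk, List.foldl_cons]
    have ekey : N ++ Z ++ P ++ (x :: s') ++ t = (N ++ Z ++ P) ++ x :: (s' ++ t) := by simp
    have hlen : ((N ++ Z ++ P).length : Int) = ((N.length + Z.length + P.length : Nat) : Int) := by
      simp; omega
    by_cases hx : x > 0
    · -- key > 0: continue
      have hxn : ¬ (x < 0) := by omega
      have hxz : ¬ (x = 0) := by omega
      have hg : stepA
          (N ++ Z ++ P ++ (x :: s') ++ t) ((N.length + Z.length + P.length : Nat) : Int)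
          = N ++ Z ++ (P ++ [x]) ++ s' ++ t := by
        simp only [stepA]; rw [ekey, ← hlen, pyGetD_append_length, if_pos hx]
        simp
      rw [hg]
      have e6 : ((N.length + Z.length + P.length : Nat) : Int) + (((x :: s').length : Nat) : Int)
          = ((N.length + Z.length + (P ++ [x]).length : Nat) : Int) + ((s'.length : Nat) : Int) := by
        simp; omega
      have e5 : ((N.length + Z.length + P.length : Nat) : Int) + 1
          = ((N.length + Z.length + (P ++ [x]).length : Nat) : Int) := by
        simp; omega
      rw [e6, e5]
      rw [ih N Z (P ++ [x]) t hN hZ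
        (fun y hy => by rcases List.mem_append.mp hy with h | h
                        · exact hP y h
                        · simp at h; omega)]
      simp [List.filter_cons, hxn, hxz, hx]
    · -- key ≤ 0: insertion via the while loop
      have eQ : N ++ Z ++ P ++ (x :: s') ++ t = N ++ (Z ++ P) ++ x :: (s' ++ t) := by simp
      have hQpos : ∀ y ∈ Z ++ P, (0:Int) ≤ y := by
        intro y hy
        rcases List.mem_append.mp hy with h | h
        · exact le_of_eq (hZ y h).symm
        · exact le_of_lt (hP y h)
      have hNlast : ∀ h : N ≠ [], N.getLast h < 0 := fun h => hN _ (List.getLast_mem h)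
      have hshift := shiftA (Z ++ P) N (s' ++ t) x
        ((N ++ Z ++ P).length) hQpos hNlast (by simp)
      have hg : stepA
          (N ++ Z ++ P ++ (x :: s') ++ t) ((N.length + Z.length + P.length : Nat) : Int)
          = N ++ x :: ((Z ++ P) ++ (s' ++ t)) := by
        simp only [stepA]; rw [ekey, ← hlen, pyGetD_append_length, if_neg hx]
        simp only [Int.toNat_natCast]
        rw [show ((N ++ Z ++ P).length : Int) - 1 = ((N.length + (Z ++ P).length : Nat) : Int) - 1 by simp]
        rw [show (N ++ Z ++ P) ++ x :: (s' ++ t) = N ++ (Z ++ P) ++ x :: (s' ++ t) by simp]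
        rw [hshift]
        rw [show (N.length : Int) - 1 + 1 = (N.length : Int) by ring]
        rw [pySetD_headDup]
      rw [hg]
      by_cases hx0 : x = 0
      · subst hx0
        have e0 : N ++ (0:Int) :: ((Z ++ P) ++ (s' ++ t)) = N ++ (Z ++ [0]) ++ P ++ s' ++ t := by
          rw [show (0:Int) :: ((Z ++ P) ++ (s' ++ t)) = ((0:Int) :: Z) ++ P ++ s' ++ t by simp]
          rw [zeros_swap Z hZ]
          simp
        rw [e0]
        have e6 : ((N.length + Z.length + P.length : Nat) : Int) + ((((0:Int) :: s').length : Nat) : Int)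
            = ((N.length + (Z ++ [0]).length + P.length : Nat) : Int) + ((s'.length : Nat) : Int) := by
          simp; omega
        have e5 : ((N.length + Z.length + P.length : Nat) : Int) + 1
            = ((N.length + (Z ++ [0]).length + P.length : Nat) : Int) := by
          simp; omega
        rw [e6, e5]
        rw [ih N (Z ++ [0]) P t hN
          (fun y hy => by rcases List.mem_append.mp hy with h | h
                          · exact hZ y h
                          · simpa using h) hP]
        simp [List.filter_cons]
      · have hneg : x < 0 := by omega
        have hxz : ¬ (x = 0) := hx0
        have hxp : ¬ (0 < x) := by omega
        have e0 : N ++ x :: ((Z ++ P) ++ (s' ++ t)) = (N ++ [x]) ++ Z ++ P ++ s' ++ t := by simp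
        rw [e0]
        have e6 : ((N.length + Z.length + P.length : Nat) : Int) + (((x :: s').length : Nat) : Int)
            = (((N ++ [x]).length + Z.length + P.length : Nat) : Int) + ((s'.length : Nat) : Int) := by
          simp; omega
        have e5 : ((N.length + Z.length + P.length : Nat) : Int) + 1
            = (((N ++ [x]).length + Z.length + P.length : Nat) : Int) := by
          simp; omega
        rw [e6, e5]
        rw [ih (N ++ [x]) Z P t
          (fun y hy => by rcases List.mem_append.mp hy with h | h
                          · exact hN y h
                          · simp at h; omega) hZ hP]
        simp [List.filter_cons, hneg, hxz, hxp]

theorem main_equiv (n : Int) (arr : List Int) (hpre : n ≤ PySem.List.len arr) :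
    rearrange_1 n arr = rearrange_1_alt n arr := by
  by_cases hn : n ≤ 0
  · rw [rearrange_1, PySem.List.pyRange_one_eq_nil hn, rearrange_1_alt]
    have hm : max n 0 = 0 := max_eq_right hn
    rw [hm]
    have hs : PySem.List.slice arr (some 0) (some 0) = [] := by simp [pysem]
    rw [hs]
    simp
  · have hn0 : 0 < n := by omega
    have hk : (n.toNat : Int) = n := Int.toNat_of_nonneg (le_of_lt hn0)
    have hlen : n.toNat ≤ arr.length := by
      have := hpre; rw [PySem.List.len_eq] at this; omega
    have htake : (arr.take n.toNat).length = n.toNat := by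
      simp [List.length_take]; omega
    have H := outerA (arr.take n.toNat) [] [] [] (arr.drop n.toNat)
      (by simp) (by simp) (by simp)
    rw [htake] at H
    simp only [List.length_nil, List.nil_append, List.append_nil] at H
    norm_num at H
    have hm : max n 0 = n := max_eq_left (le_of_lt hn0)
    rw [hm] at H
    rw [rearrange_1, H, rearrange_1_alt, hm]
    rw [PySem.List.slice_zero_start, PySem.List.slice_to arr (le_of_lt hn0)]
    simp

-- ===== VERDICT (by name: the statement is the Claim_ definition above) =====
theorem rearrange_1_spec : Claim_equal_rearrange_1 := by
  intro n arr _ hpre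
  unfold Spec_rearrange_1
  exact main_equiv n arr hpre
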